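-- pv_equiv track=rewrite | github.com/KeldrickD/lead-gen-bot | optimizer.py | _make_concise
-- ===== SOURCE A (Python) =====
-- def _make_concise(template_text, type_key):
--     """Make the template more concise."""
--     # Split into sentences
--     template_text = template_text.replace('\n', ' ')
--     sentences = []
--     current = ""
--
--     for char in template_text:
--         current += char
--         if char in ['.', '!', '?'] and len(current.strip()) > 0:
--             sentences.append(current.strip())
--             current = ""
--
--     if current.strip():
--         sentences.append(current.strip())
--
--     # Remove unnecessary phrases
--     phrases_to_remove = [
--         "I hope this message finds you well",
--         "I wanted to reach out",
--         "I am writing to",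
--         "Just wanted to",
--         "I thought I would"
--     ]
--
--     condensed_sentences = []
--     for sentence in sentences:
--         should_keep = True
--         for phrase in phrases_to_remove:
--             if phrase.lower() in sentence.lower():
--                 should_keep = False
--                 break
--
--         if should_keep:
--             condensed_sentences.append(sentence)
--
--     # Combine shorter sentences
--     result = ' '.join(condensed_sentences)
--
--     # Ensure it includes placeholders
--     if '{owner_name}' not in result:
--         result = f"Hi {{owner_name}}! {result}"
--
--     if '{business_name}' not in result and '{business_type}' not in result:
--         result = result.replace("!", f"! I noticed your {{business_type}} business ({{business_name}}).")
--
--     return result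
-- ===== SOURCE B (Python) =====
-- PHRASES_LOWER = [
--     "i hope this message finds you well",
--     "i wanted to reach out",
--     "i am writing to",
--     "just wanted to",
--     "i thought i would",
-- ]
--
-- TERMINATORS = ('.', '!', '?')
--
--
-- def _first_terminator(s):
--     """Index of the first sentence terminator in s, or None."""
--     return next((i for i, c in enumerate(s) if c in TERMINATORS), None)
--
--
-- def _make_concise(template_text, type_key):
--     """Make the template more concise."""
--     # Segment into sentences by cutting at each terminator, then strip segments.
--     rest = template_text.replace('\n', ' ')
--     sentences = []
--     while True:
--         i = _first_terminator(rest)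
--         if i is None:
--             tail = rest.strip()
--             if tail:
--                 sentences.append(tail)
--             break
--         sentences.append(rest[:i + 1].strip())
--         rest = rest[i + 1:]
--
--     # Drop sentences containing an unnecessary phrase.
--     condensed = [s for s in sentences
--                  if not any(p in s.lower() for p in PHRASES_LOWER)]
--
--     result = ' '.join(condensed)
--
--     # Ensure it includes placeholders.
--     if '{owner_name}' not in result:
--         result = f"Hi {{owner_name}}! {result}"
--
--     if '{business_name}' not in result and '{business_type}' not in result:
--         result = result.replace("!", f"! I noticed your {{business_type}} business ({{business_name}}).")
--
--     return result
-- ===== Notes on version B (the rewrite author's own statement) =====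
-- stated objective: idiomatic
-- what changed: A's character-by-character accumulator loop (building 'current' one char at a time and flushing at terminators) is replaced by cutting the text at the next sentence terminator in a find-and-slice loop, and A's nested keep/break phrase loop is replaced by a comprehension filter over pre-lowered phrase constants.
import Mathlib
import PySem

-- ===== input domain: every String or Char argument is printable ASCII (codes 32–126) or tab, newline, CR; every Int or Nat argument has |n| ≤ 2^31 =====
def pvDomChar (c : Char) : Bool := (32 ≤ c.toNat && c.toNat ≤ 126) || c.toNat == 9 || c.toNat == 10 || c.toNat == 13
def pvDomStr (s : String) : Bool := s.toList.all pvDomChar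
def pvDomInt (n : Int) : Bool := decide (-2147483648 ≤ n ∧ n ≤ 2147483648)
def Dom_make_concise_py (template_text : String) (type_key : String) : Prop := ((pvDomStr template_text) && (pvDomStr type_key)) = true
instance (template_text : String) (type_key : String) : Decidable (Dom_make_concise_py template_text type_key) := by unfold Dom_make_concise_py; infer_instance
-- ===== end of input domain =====

-- B replaces A's character-by-character accumulator loop with a cut-at-next-terminator
-- segmentation and a comprehension-style filter over pre-lowered phrases (objective: idiomatic).

-- ===== PORT A =====
-- A's per-character loop body: state = (sentences so far, current accumulated chars)
def pvStepA (st : List (List Char) × List Char) (c : Char) : List (List Char) × List Char :=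
  let cur := st.2 ++ [c]
  if (['.', '!', '?'].contains c) && (PySem.Chars.strip cur).length > 0 then
    (st.1 ++ [PySem.Chars.strip cur], [])
  else (st.1, cur)

def pvPhrasesA : List (List Char) :=
  [ "I hope this message finds you well", "I wanted to reach out", "I am writing to",
    "Just wanted to", "I thought I would" ].map String.toList

-- A's inner phrase loop with break
def pvKeepA : List (List Char) → List Char → Bool
  | [], _ => true
  | p :: ps, s =>
    if PySem.Chars.isIn (PySem.Chars.lower p) (PySem.Chars.lower s) then false
    else pvKeepA ps s

def make_concise_py (template_text : String) (type_key : String) : String :=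
  let text := PySem.Chars.replace template_text.toList ['\n'] [' ']
  let st := text.foldl pvStepA ([], [])
  let sentences :=
    if (PySem.Chars.strip st.2).length > 0 then st.1 ++ [PySem.Chars.strip st.2] else st.1
  let condensed := sentences.foldl (fun acc s => if pvKeepA pvPhrasesA s then acc ++ [s] else acc) []
  let result := PySem.Chars.join [' '] condensed
  let result :=
    if !(PySem.Chars.isIn "{owner_name}".toList result) then "Hi {owner_name}! ".toList ++ result
    else result
  let result :=
    if !(PySem.Chars.isIn "{business_name}".toList result)
        && !(PySem.Chars.isIn "{business_type}".toList result) then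
      PySem.Chars.replace result ['!']
        "! I noticed your {business_type} business ({business_name}).".toList
    else result
  String.ofList result

-- ===== PORT B =====
def pvTerm (c : Char) : Bool := c == '.' || c == '!' || c == '?'

-- B: cut at the first terminator, strip the piece, recurse on the remainder.
def pvSplitB (cs : List Char) : List (List Char) :=
  match h : cs.dropWhile (fun c => !pvTerm c) with
  | [] =>
      let tail := PySem.Chars.strip cs
      if tail.isEmpty then [] else [tail]
  | c :: rest =>
      PySem.Chars.strip (cs.takeWhile (fun c => !pvTerm c) ++ [c]) :: pvSplitB rest
termination_by cs.length
decreasing_by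
  have hle : (cs.dropWhile (fun c => !pvTerm c)).length ≤ cs.length := cs.length_dropWhile_le _
  rw [h] at hle; simp at hle; omega

def pvPhrasesLowerB : List (List Char) :=
  [ "i hope this message finds you well", "i wanted to reach out", "i am writing to",
    "just wanted to", "i thought i would" ].map String.toList

def make_concise_py_alt (template_text : String) (type_key : String) : String :=
  let sentences := pvSplitB (PySem.Chars.replace template_text.toList ['\n'] [' '])
  let condensed :=
    sentences.filter (fun s => !(pvPhrasesLowerB.any (fun p => PySem.Chars.isIn p (PySem.Chars.lower s))))
  let result := PySem.Chars.join [' '] condensed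
  let result :=
    if !(PySem.Chars.isIn "{owner_name}".toList result) then "Hi {owner_name}! ".toList ++ result
    else result
  let result :=
    if !(PySem.Chars.isIn "{business_name}".toList result)
        && !(PySem.Chars.isIn "{business_type}".toList result) then
      PySem.Chars.replace result ['!']
        "! I noticed your {business_type} business ({business_name}).".toList
    else result
  String.ofList result

-- ===== PRECONDITION & SPEC =====
def Spec_make_concise_py (template_text : String) (type_key : String) (out : String) : Prop := out = make_concise_py_alt template_text type_key
instance (template_text : String) (type_key : String) (out : String) : Decidable (Spec_make_concise_py template_text type_key out) := by unfold Spec_make_concise_py; infer_instance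

-- ===== CLAIM (what is proved, stated in full; the proofs are below) =====
def Claim_equal_make_concise_py : Prop := ∀ (template_text : String) (type_key : String), Dom_make_concise_py template_text type_key → Spec_make_concise_py template_text type_key (make_concise_py template_text type_key)

-- ===== LEMMAS AND PROOFS =====

-- reference splitter mirroring A's loop condition, used to relate the two segmentations
def pvSplitAux (cur : List Char) : List Char → List (List Char)
  | [] => if (PySem.Chars.strip cur).length > 0 then [PySem.Chars.strip cur] else []
  | c :: rest =>
      if (['.', '!', '?'].contains c) && (PySem.Chars.strip (cur ++ [c])).length > 0 then
        PySem.Chars.strip (cur ++ [c]) :: pvSplitAux [] rest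
      else pvSplitAux (cur ++ [c]) rest

-- A's end-of-loop flush of the pending current segment
def pvFlush (st : List (List Char) × List Char) : List (List Char) :=
  if (PySem.Chars.strip st.2).length > 0 then st.1 ++ [PySem.Chars.strip st.2] else st.1

theorem pvTerm_eq_contains (c : Char) : (['.', '!', '?'].contains c) = pvTerm c := by
  simp [pvTerm, Bool.or_assoc, BEq.beq]

theorem pvStrip_append_nonspace (xs : List Char) (c : Char) (h : PySem.Chars.isspace c = false) :
    PySem.Chars.strip (xs ++ [c]) = xs.dropWhile PySem.Chars.isspace ++ [c] := by
  unfold PySem.Chars.strip PySem.Chars.lstrip PySem.Chars.rstrip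
  rw [List.dropWhile_append]
  split_ifs with h1
  · simp at h1
    simp [h, List.dropWhile_eq_nil_iff]
    exact h1
  · simp [h]

theorem pvTerm_not_space {c : Char} (h : pvTerm c = true) : PySem.Chars.isspace c = false := by
  simp [pvTerm] at h
  rcases h with (h | h) | h <;> subst h <;> decide

theorem pvStrip_term_pos (xs : List Char) {c : Char} (h : pvTerm c = true) :
    (PySem.Chars.strip (xs ++ [c])).length > 0 := by
  rw [pvStrip_append_nonspace xs c (pvTerm_not_space h)]; simp

theorem pvFoldA_eq (cs : List Char) : ∀ (acc : List (List Char)) (cur : List Char),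
    pvFlush (cs.foldl pvStepA (acc, cur)) = acc ++ pvSplitAux cur cs := by
  induction cs with
  | nil =>
    intro acc cur
    simp only [List.foldl_nil, pvFlush, pvSplitAux]
    split_ifs <;> simp
  | cons c rest ih =>
    intro acc cur
    simp only [List.foldl_cons]
    by_cases hc : ((['.', '!', '?'].contains c) && (PySem.Chars.strip (cur ++ [c])).length > 0) = true
    · rw [show pvStepA (acc, cur) c = (acc ++ [PySem.Chars.strip (cur ++ [c])], []) by
        simp only [pvStepA]; rw [if_pos hc]]
      rw [ih]
      simp only [pvSplitAux]
      rw [if_pos hc, List.append_assoc]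
      rfl
    · rw [show pvStepA (acc, cur) c = (acc, cur ++ [c]) by
        simp only [pvStepA]; rw [if_neg hc]]
      rw [ih]
      simp only [pvSplitAux]
      rw [if_neg hc]

theorem pvSplitAux_noterm (cs : List Char) : ∀ (cur : List Char),
    (∀ c ∈ cs, pvTerm c = false) →
    pvSplitAux cur cs
      = if (PySem.Chars.strip (cur ++ cs)).length > 0 then [PySem.Chars.strip (cur ++ cs)] else [] := by
  induction cs with
  | nil => intro cur _; simp [pvSplitAux]
  | cons c rest ih =>
    intro cur h
    have hc : pvTerm c = false := h c (by simp)
    simp only [pvSplitAux, pvTerm_eq_contains, hc, Bool.false_and, if_neg Bool.false_ne_true]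
    rw [ih (cur ++ [c]) (fun x hx => h x (by simp [hx]))]
    simp

theorem pvSplitAux_pre (pre : List Char) : ∀ (cur l : List Char),
    (∀ c ∈ pre, pvTerm c = false) →
    pvSplitAux cur (pre ++ l) = pvSplitAux (cur ++ pre) l := by
  induction pre with
  | nil => intro cur l _; simp
  | cons c rest ih =>
    intro cur l h
    have hc : pvTerm c = false := h c (by simp)
    simp only [List.cons_append, pvSplitAux, pvTerm_eq_contains, hc, Bool.false_and,
      if_neg Bool.false_ne_true]
    rw [ih (cur ++ [c]) l (fun x hx => h x (by simp [hx]))]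
    simp

theorem pvDropWhile_cons_head {α : Type} {p : α → Bool} {l rest : List α} {c : α}
    (h : l.dropWhile p = c :: rest) : p c = false := by
  induction l with
  | nil => simp at h
  | cons a as ih =>
    rw [List.dropWhile_cons] at h
    by_cases ha : p a = true
    · rw [if_pos ha] at h; exact ih h
    · rw [if_neg ha] at h
      cases h
      simpa using ha

theorem pvSplitB_noterm (cs : List Char) (h : List.dropWhile (fun c => !pvTerm c) cs = []) :
    pvSplitB cs = if (PySem.Chars.strip cs).isEmpty then [] else [PySem.Chars.strip cs] := by
  rw [pvSplitB]
  split
  · rfl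
  · rename_i c rest heq
    rw [h] at heq; cases heq

theorem pvSplitB_cons (cs : List Char) (c : Char) (rest : List Char)
    (h : List.dropWhile (fun c => !pvTerm c) cs = c :: rest) :
    pvSplitB cs = PySem.Chars.strip (cs.takeWhile (fun c => !pvTerm c) ++ [c]) :: pvSplitB rest := by
  rw [pvSplitB]
  split
  · rename_i heq; rw [h] at heq; cases heq
  · rename_i c' rest' heq
    rw [h] at heq
    cases heq
    rfl

theorem pvSplitB_eq (cs : List Char) : pvSplitB cs = pvSplitAux [] cs := by
  induction cs using pvSplitB.induct with
  | case1 cs h hemp =>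
    rw [pvSplitB_noterm cs h]
    have hall : ∀ c ∈ cs, pvTerm c = false := by
      intro c hc
      simpa using (List.dropWhile_eq_nil_iff.mp h) c hc
    rw [pvSplitAux_noterm cs [] hall, List.nil_append]
    rcases Nat.eq_zero_or_pos (PySem.Chars.strip cs).length with h0 | h0
    · simp [List.length_eq_zero_iff.mp h0]
    · rw [if_pos h0]
      have hne : (PySem.Chars.strip cs).isEmpty = false := by
        rw [List.isEmpty_eq_false_iff]
        intro hh; rw [hh] at h0; simp at h0
      simp [hne]
  | case2 cs h hemp =>
    rw [pvSplitB_noterm cs h]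
    have hall : ∀ c ∈ cs, pvTerm c = false := by
      intro c hc
      simpa using (List.dropWhile_eq_nil_iff.mp h) c hc
    rw [pvSplitAux_noterm cs [] hall, List.nil_append]
    rcases Nat.eq_zero_or_pos (PySem.Chars.strip cs).length with h0 | h0
    · simp [List.length_eq_zero_iff.mp h0]
    · rw [if_pos h0]
      have hne : (PySem.Chars.strip cs).isEmpty = false := by
        rw [List.isEmpty_eq_false_iff]
        intro hh; rw [hh] at h0; simp at h0
      simp [hne]
  | case3 cs c rest h ih =>
    rw [pvSplitB_cons cs c rest h]
    have hsplit : cs = cs.takeWhile (fun c => !pvTerm c) ++ (c :: rest) := by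
      conv_lhs => rw [← List.takeWhile_append_dropWhile (p := fun c => !pvTerm c) (l := cs)]
      rw [h]
    have hpre : ∀ x ∈ cs.takeWhile (fun c => !pvTerm c), pvTerm x = false := by
      intro x hx
      simpa using List.mem_takeWhile_imp hx
    have hc : pvTerm c = true := by
      simpa using pvDropWhile_cons_head h
    conv_rhs => rw [hsplit]
    rw [pvSplitAux_pre _ [] _ hpre, List.nil_append]
    simp only [pvSplitAux, pvTerm_eq_contains, hc, Bool.true_and]
    rw [if_pos (by simpa using pvStrip_term_pos (cs.takeWhile (fun c => !pvTerm c)) hc)]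
    rw [ih]

theorem pvKeepA_eq (s : List Char) : ∀ ps,
    pvKeepA ps s = !(ps.any fun p => PySem.Chars.isIn (PySem.Chars.lower p) (PySem.Chars.lower s)) := by
  intro ps
  induction ps with
  | nil => simp [pvKeepA]
  | cons p ps ih =>
    simp only [pvKeepA, List.any_cons, Bool.not_or]
    split_ifs with h
    · simp [h]
    · simp only [Bool.not_eq_true] at h
      simp [h, ih]

theorem pvPhrases_lower : pvPhrasesA.map PySem.Chars.lower = pvPhrasesLowerB := by
  decide

theorem pvKeep_eq_any (s : List Char) :
    pvKeepA pvPhrasesA s = !(pvPhrasesLowerB.any fun p => PySem.Chars.isIn p (PySem.Chars.lower s)) := by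
  rw [pvKeepA_eq, ← pvPhrases_lower, List.any_map]
  rfl

-- ===== VERDICT (by name: the statement is the Claim_ definition above) =====
theorem make_concise_py_spec : Claim_equal_make_concise_py := by
  intro template_text type_key _
  unfold Spec_make_concise_py
  simp only [make_concise_py, make_concise_py_alt]
  have h1 := pvFoldA_eq (PySem.Chars.replace template_text.toList ['\n'] [' ']) [] []
  simp only [pvFlush, List.nil_append] at h1
  rw [h1, PySem.List.foldl_append_if_eq_filter, List.nil_append, pvSplitB_eq,
    List.filter_congr (fun s _ => pvKeep_eq_any s)]
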